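-- pv_equiv track=rewrite | github.com/KatarinaVdP/master2022 | Old Model/old_model_gurobi.py | read_subset
-- ===== SOURCE A (Python) =====
-- def read_subset(matrix, affiliating_set, index_set):
--         subset=[]
--         subsetIndex=[]
--         for i in range(len(index_set)):
--             subsublist=[]
--             subsublistIndex=[]
--             for j in range(len(affiliating_set)):
--                 if int(matrix[i][j])==1:
--                     subsublist.append(affiliating_set[j])
--                     subsublistIndex.append(j)
--             subset.append(subsublist)
--             subsetIndex.append(subsublistIndex)
--         return subset, subsetIndex
-- ===== SOURCE B (Python) =====
-- def read_subset(matrix, affiliating_set, index_set):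
--     # Column-major sweep: outer loop over columns; each column extends every
--     # row's accumulator pair at once, instead of A's row-by-row inner scan.
--     pairs = [([], []) for _ in index_set]
--     for j, name in enumerate(affiliating_set):
--         pairs = [(names + [name], idxs + [j]) if int(matrix[i][j]) == 1 else (names, idxs)
--                  for i, (names, idxs) in enumerate(pairs)]
--     return [p[0] for p in pairs], [p[1] for p in pairs]
-- ===== Notes on version B (the rewrite author's own statement) =====
-- stated objective: alternative
-- what changed: B traverses the matrix column-major (outer loop over affiliating_set's columns, rebuilding all rows' accumulator pairs at each column) instead of A's row-major nested scan; correctness rests on each row's picks still appearing in increasing column order.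
import Mathlib
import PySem

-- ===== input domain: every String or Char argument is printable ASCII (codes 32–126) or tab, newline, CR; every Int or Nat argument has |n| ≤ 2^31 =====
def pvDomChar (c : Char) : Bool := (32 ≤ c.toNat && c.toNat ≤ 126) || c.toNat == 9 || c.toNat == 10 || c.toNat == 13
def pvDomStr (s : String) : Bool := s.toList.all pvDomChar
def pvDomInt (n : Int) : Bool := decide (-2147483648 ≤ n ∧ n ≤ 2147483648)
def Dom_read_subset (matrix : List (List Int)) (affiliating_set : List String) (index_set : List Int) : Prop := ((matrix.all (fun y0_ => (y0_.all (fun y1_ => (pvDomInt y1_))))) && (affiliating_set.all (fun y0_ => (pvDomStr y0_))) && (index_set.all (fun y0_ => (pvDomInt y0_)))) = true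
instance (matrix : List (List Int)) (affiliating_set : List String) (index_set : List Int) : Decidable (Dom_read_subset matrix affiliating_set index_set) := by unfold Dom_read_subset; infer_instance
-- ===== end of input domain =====

-- B sweeps the matrix column-major (outer loop over columns, extending every row's pair at once)
-- instead of A's row-major nested scan; objective: alternative traversal, same cost.

-- ===== PORT A =====
def read_subset (matrix : List (List Int)) (affiliating_set : List String) (index_set : List Int) : List (List String) × List (List Int) :=
  (PySem.List.pyRange 0 index_set.length 1).foldl
    (fun (acc : List (List String) × List (List Int)) i =>
      let inner := (PySem.List.pyRange 0 affiliating_set.length 1).foldl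
        (fun (p : List String × List Int) j =>
          if PySem.List.pyGetD (PySem.List.pyGetD matrix i []) j 0 = 1 then
            (p.1 ++ [PySem.List.pyGetD affiliating_set j ""], p.2 ++ [j])
          else p) ([], [])
      (acc.1 ++ [inner.1], acc.2 ++ [inner.2])) ([], [])

-- ===== PORT B =====
def read_subset_alt (matrix : List (List Int)) (affiliating_set : List String) (index_set : List Int) : List (List String) × List (List Int) :=
  let init : List (List String × List Int) := index_set.map (fun _ => ([], []))
  let final := (PySem.List.enumerate affiliating_set 0).foldl
    (fun (pairs : List (List String × List Int)) jn =>
      (PySem.List.enumerate pairs 0).map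
        (fun ip =>
          if PySem.List.pyGetD (PySem.List.pyGetD matrix ip.1 []) jn.1 0 = 1 then
            (ip.2.1 ++ [jn.2], ip.2.2 ++ [jn.1])
          else ip.2)) init
  (final.map Prod.fst, final.map Prod.snd)

-- ===== PRECONDITION & SPEC =====
-- Pre_ excludes exactly the inputs where Python A raises IndexError: when there are columns to
-- scan, matrix must have a row (of length ≥ len(affiliating_set)) for every position of index_set.
def Pre_read_subset (matrix : List (List Int)) (affiliating_set : List String) (index_set : List Int) : Prop :=
  affiliating_set = [] ∨
  (index_set.length ≤ matrix.length ∧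
   ∀ row ∈ matrix.take index_set.length, affiliating_set.length ≤ row.length)
instance (matrix : List (List Int)) (affiliating_set : List String) (index_set : List Int) : Decidable (Pre_read_subset matrix affiliating_set index_set) := by unfold Pre_read_subset; infer_instance
def pvWitness_read_subset : List (List Int) × List String × List Int := ([[1, 0], [0, 1]], ["a", "b"], [5, 7])
def Spec_read_subset (matrix : List (List Int)) (affiliating_set : List String) (index_set : List Int) (out : List (List String) × List (List Int)) : Prop := out = read_subset_alt matrix affiliating_set index_set
instance (matrix : List (List Int)) (affiliating_set : List String) (index_set : List Int) (out : List (List String) × List (List Int)) : Decidable (Spec_read_subset matrix affiliating_set index_set out) := by unfold Spec_read_subset; infer_instance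

-- ===== CLAIM (what is proved, stated in full; the proofs are below) =====
def Claim_equal_read_subset : Prop := ∀ (matrix : List (List Int)) (affiliating_set : List String) (index_set : List Int), Dom_read_subset matrix affiliating_set index_set → Pre_read_subset matrix affiliating_set index_set → Spec_read_subset matrix affiliating_set index_set (read_subset matrix affiliating_set index_set)

-- ===== LEMMAS AND PROOFS =====

-- enumerating a list built by mapping over an enumeration keeps the same indices
lemma pv_enum_map_enum {α β : Type} (xs : List α) (s : Int) (g : Int × α → β) :
    PySem.List.enumerate (((PySem.List.enumerate xs s).map g)) s
      = (PySem.List.enumerate xs s).map (fun ip => (ip.1, g ip)) := by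
  induction xs generalizing s with
  | nil => simp [PySem.List.enumerate_nil]
  | cons x xs ih => simp [PySem.List.enumerate_cons, ih]

-- A's inner per-row fold, closed form
lemma pv_inner (js : List Int) (p : Int → Prop) [DecidablePred p] (f : Int → String)
    (a1 : List String) (a2 : List Int) :
    js.foldl (fun (q : List String × List Int) j =>
        if p j then (q.1 ++ [f j], q.2 ++ [j]) else q) (a1, a2)
      = (a1 ++ (js.filter (fun j => decide (p j))).map f, a2 ++ js.filter (fun j => decide (p j))) := by
  induction js generalizing a1 a2 with
  | nil => simp
  | cons x xs ih =>
    by_cases h : p x <;> simp [h, ih]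

-- A's outer fold, closed form
lemma pv_outer (is : List Int) (f : Int → List String) (g : Int → List Int)
    (a1 : List (List String)) (a2 : List (List Int)) :
    is.foldl (fun (acc : List (List String) × List (List Int)) i =>
        (acc.1 ++ [f i], acc.2 ++ [g i])) (a1, a2)
      = (a1 ++ is.map f, a2 ++ is.map g) := by
  induction is generalizing a1 a2 with
  | nil => simp
  | cons x xs ih => simp [ih]

-- the column-major fold acts on each row position independently
lemma pv_colfold (cond : Int → Int → Prop) [h : ∀ i j, Decidable (cond i j)]
    (cols : List (Int × String)) (P : List (List String × List Int)) :
    cols.foldl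
      (fun (pairs : List (List String × List Int)) jn =>
        (PySem.List.enumerate pairs 0).map
          (fun ip => if cond ip.1 jn.1 then (ip.2.1 ++ [jn.2], ip.2.2 ++ [jn.1]) else ip.2)) P
      = (PySem.List.enumerate P 0).map
          (fun ip => cols.foldl
            (fun (q : List String × List Int) jn =>
              if cond ip.1 jn.1 then (q.1 ++ [jn.2], q.2 ++ [jn.1]) else q) ip.2) := by
  induction cols generalizing P with
  | nil =>
    simp only [List.foldl_nil]
    exact (PySem.List.map_snd_enumerate P 0).symm
  | cons c cs ih =>
    simp only [List.foldl_cons]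
    rw [ih, pv_enum_map_enum]
    simp [List.map_map]

-- ===== VERDICT (by name: the statement is the Claim_ definition above) =====
theorem read_subset_spec : Claim_equal_read_subset := by
  intro matrix aff idx _ _
  unfold Spec_read_subset read_subset read_subset_alt
  -- close A's folds
  have hinner : ∀ i, (PySem.List.pyRange 0 aff.length 1).foldl
      (fun (p : List String × List Int) j =>
        if PySem.List.pyGetD (PySem.List.pyGetD matrix i []) j 0 = 1 then
          (p.1 ++ [PySem.List.pyGetD aff j ""], p.2 ++ [j])
        else p) ([], [])
      = (((PySem.List.pyRange 0 aff.length 1).filter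
            (fun j => PySem.List.pyGetD (PySem.List.pyGetD matrix i []) j 0 == 1)).map
          (fun j => PySem.List.pyGetD aff j ""),
         (PySem.List.pyRange 0 aff.length 1).filter
            (fun j => PySem.List.pyGetD (PySem.List.pyGetD matrix i []) j 0 == 1)) := by
    intro i
    have := pv_inner (PySem.List.pyRange 0 aff.length 1)
      (fun j => PySem.List.pyGetD (PySem.List.pyGetD matrix i []) j 0 = 1)
      (fun j => PySem.List.pyGetD aff j "") [] []
    simpa using this
  simp only [hinner]
  rw [pv_outer]
  -- close B's column-major fold
  rw [pv_colfold (fun i j => PySem.List.pyGetD (PySem.List.pyGetD matrix i []) j 0 = 1)]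
  -- enumerate of the all-empty init: indices 0..n-1, payload ([],[])
  have hmapc : (PySem.List.enumerate (idx.map (fun _ => (([] : List String), ([] : List Int)))) 0).map
      (fun ip => (PySem.List.enumerate aff 0).foldl
        (fun (q : List String × List Int) jn =>
          if PySem.List.pyGetD (PySem.List.pyGetD matrix ip.1 []) jn.1 0 = 1 then
            (q.1 ++ [jn.2], q.2 ++ [jn.1]) else q) ip.2)
      = (PySem.List.pyRange 0 idx.length 1).map
        (fun i => (PySem.List.enumerate aff 0).foldl
          (fun (q : List String × List Int) jn =>
            if PySem.List.pyGetD (PySem.List.pyGetD matrix i []) jn.1 0 = 1 then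
              (q.1 ++ [jn.2], q.2 ++ [jn.1]) else q) ([], [])) := by
    rw [PySem.List.enumerate_eq_map_pyRange (d := (([] : List String), ([] : List Int)))]
    simp only [List.map_map, PySem.List.len_eq, List.length_map]
    apply List.map_congr_left
    intro j hj
    have hj' := (PySem.List.mem_pyRange_one).1 (by simpa using hj)
    have hinit : PySem.List.pyGetD (idx.map (fun _ => (([] : List String), ([] : List Int)))) j
        ((([] : List String), ([] : List Int))) = ([], []) := by
      rcases hj' with ⟨h0, h1⟩
      rw [PySem.List.pyGetD_eq_getElem (xs := idx.map (fun _ => (([] : List String), ([] : List Int))))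
        (i := j) (d := (([] : List String), ([] : List Int))) (by omega) (by simpa using h1)]
      simp
    simp only [Function.comp_apply]
    rw [hinit]
  rw [hmapc]
  -- finally, show each row's column fold equals A's row filter
  have hrow : ∀ i, (PySem.List.enumerate aff 0).foldl
      (fun (q : List String × List Int) jn =>
        if PySem.List.pyGetD (PySem.List.pyGetD matrix i []) jn.1 0 = 1 then
          (q.1 ++ [jn.2], q.2 ++ [jn.1]) else q) ([], [])
      = (((PySem.List.pyRange 0 aff.length 1).filter
            (fun j => PySem.List.pyGetD (PySem.List.pyGetD matrix i []) j 0 == 1)).map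
          (fun j => PySem.List.pyGetD aff j ""),
         (PySem.List.pyRange 0 aff.length 1).filter
            (fun j => PySem.List.pyGetD (PySem.List.pyGetD matrix i []) j 0 == 1)) := by
    intro i
    rw [PySem.List.enumerate_eq_map_pyRange (d := "")]
    rw [List.foldl_map]
    have := pv_inner (PySem.List.pyRange 0 aff.length 1)
      (fun j => PySem.List.pyGetD (PySem.List.pyGetD matrix i []) j 0 = 1)
      (fun j => PySem.List.pyGetD aff j "") [] []
    simpa using this
  simp only [hrow, List.map_map]
  simp [Function.comp]
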